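-- pv_equiv track=rewrite | github.com/AHG-BSCS/Wriple | app/core/rdm_processor.py | _find_contiguous_clusters
-- ===== SOURCE A (Python) =====
-- def _find_contiguous_clusters(indices):
--     """
--     Find contiguous clusters in a list of indices.
--
--     Args:
--         indices: List of integer indices (sorted in ascending order).
--
--     Returns:
--         List of tuples representing start and end of each contiguous cluster.
--     """
--     if len(indices) == 0:
--         return []
--     clusters = []
--     start = indices[0]
--     end = indices[0]
--     for idx in indices[1:]:
--         if idx == end + 1:
--             end = idx
--         else:
--             clusters.append((start, end))
--             start = idx
--             end = idx
--     clusters.append((start, end))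
--     return clusters
-- ===== SOURCE B (Python) =====
-- def _find_contiguous_clusters(indices):
--     # Group positions by the key value - position: within a contiguous run
--     # the key is constant, so groups are exactly the runs.
--     groups = []
--     for pos, val in enumerate(indices):
--         if groups and val - pos == groups[-1][0][1] - groups[-1][0][0]:
--             groups[-1].append((pos, val))
--         else:
--             groups.append([(pos, val)])
--     return [(g[0][1], g[-1][1]) for g in groups]
-- ===== Notes on version B (the rewrite author's own statement) =====
-- stated objective: alternative
-- what changed: B replaces A's explicit start/end run-tracking with an itertools.groupby-style key-grouping pass: it groups enumerate(indices) by the constant key value - position and emits (first value, last value) of each group.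
import Mathlib
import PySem

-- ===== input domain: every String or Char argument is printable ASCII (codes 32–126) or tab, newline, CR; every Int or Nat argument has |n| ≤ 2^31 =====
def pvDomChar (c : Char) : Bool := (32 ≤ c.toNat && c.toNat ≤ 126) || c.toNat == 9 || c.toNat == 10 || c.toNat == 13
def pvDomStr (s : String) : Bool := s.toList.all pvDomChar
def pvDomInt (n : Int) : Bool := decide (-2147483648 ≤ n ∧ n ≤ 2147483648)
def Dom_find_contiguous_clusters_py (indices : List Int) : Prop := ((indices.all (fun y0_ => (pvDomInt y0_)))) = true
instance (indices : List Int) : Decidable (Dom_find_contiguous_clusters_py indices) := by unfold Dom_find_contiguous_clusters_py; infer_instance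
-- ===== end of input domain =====

-- B groups enumerate(indices) by the key value - position instead of tracking start/end of the
-- current run explicitly; same O(n) cost, alternative structure.

-- ===== PORT A =====
-- A's loop state: (clusters, start, end)
def pvAStep (s : List (Int × Int) × Int × Int) (idx : Int) : List (Int × Int) × Int × Int :=
  if idx = s.2.2 + 1 then (s.1, s.2.1, idx)
  else (s.1 ++ [(s.2.1, s.2.2)], idx, idx)

def find_contiguous_clusters_py (indices : List Int) : List (Int × Int) :=
  match indices with
  | [] => []
  | i0 :: rest =>
    let st := rest.foldl pvAStep ([], i0, i0)
    st.1 ++ [(st.2.1, st.2.2)]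

-- ===== PORT B =====
-- enumerate(indices) (index carried as Int, since B subtracts it from the value)
def pvEnum (n : Int) : List Int → List (Int × Int)
  | [] => []
  | v :: rest => (n, v) :: pvEnum (n + 1) rest

-- one step of B's grouping loop: append to the last group if the key matches, else open a new group
-- (g[0] / g[-1] only ever hit nonempty groups in B; ported as headD/getLastD, exact on B's runs)
def pvGroupStep (groups : List (List (Int × Int))) (p : Int × Int) : List (List (Int × Int)) :=
  let lastg := groups.getLastD []
  if groups ≠ [] ∧ p.2 - p.1 = (lastg.headD (0, 0)).2 - (lastg.headD (0, 0)).1 then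
    groups.dropLast ++ [lastg ++ [p]]
  else groups ++ [[p]]

def pvEmit (g : List (Int × Int)) : Int × Int := ((g.headD (0, 0)).2, (g.getLastD (0, 0)).2)

def find_contiguous_clusters_py_alt (indices : List Int) : List (Int × Int) :=
  ((pvEnum 0 indices).foldl pvGroupStep []).map pvEmit

-- ===== PRECONDITION & SPEC =====
def Spec_find_contiguous_clusters_py (indices : List Int) (out : List (Int × Int)) : Prop := out = find_contiguous_clusters_py_alt indices
instance (indices : List Int) (out : List (Int × Int)) : Decidable (Spec_find_contiguous_clusters_py indices out) := by unfold Spec_find_contiguous_clusters_py; infer_instance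

-- ===== CLAIM (what is proved, stated in full; the proofs are below) =====
def Claim_equal_find_contiguous_clusters_py : Prop := ∀ (indices : List Int), Dom_find_contiguous_clusters_py indices → Spec_find_contiguous_clusters_py indices (find_contiguous_clusters_py indices)

-- ===== LEMMAS AND PROOFS =====

-- simulation: A's loop from state (clusters, start, end) and B's loop from groups = gs ++ [g]
-- compute the same final output, provided the states correspond.
theorem pv_simul (rest : List Int) : ∀ (n : Int) (clusters : List (Int × Int)) (start end_ : Int)
    (gs : List (List (Int × Int))) (g : List (Int × Int)),
    g ≠ [] →
    gs.map pvEmit = clusters →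
    (g.headD (0, 0)).2 = start →
    (g.getLastD (0, 0)).2 = end_ →
    (g.headD (0, 0)).2 - (g.headD (0, 0)).1 = end_ - (n - 1) →
    (let st := rest.foldl pvAStep (clusters, start, end_)
     st.1 ++ [(st.2.1, st.2.2)])
      = ((pvEnum n rest).foldl pvGroupStep (gs ++ [g])).map pvEmit := by
  induction rest with
  | nil =>
    intro n clusters start end_ gs g hg h1 h2 h3 hk
    have hpe : pvEmit g = (start, end_) := by unfold pvEmit; rw [h2, h3]
    simp only [pvEnum, List.foldl_nil, List.map_append, List.map_cons, List.map_nil, h1, hpe]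
  | cons v rest ih =>
    intro n clusters start end_ gs g hg h1 h2 h3 hk
    have hpe : pvEmit g = (start, end_) := by unfold pvEmit; rw [h2, h3]
    have hlastD : (gs ++ [g]).getLastD [] = g := by
      simp
    have hdrop : (gs ++ [g]).dropLast = gs := by
      simp
    simp only [pvEnum, List.foldl_cons]
    by_cases hcond : v = end_ + 1
    · -- merge into the current run / current group
      have hBcond : ((n, v) : Int × Int).2 - (n, v).1
          = ((gs ++ [g]).getLastD []|>.headD (0, 0)).2 - ((gs ++ [g]).getLastD []|>.headD (0, 0)).1 := by
        rw [hlastD, hk]; omega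
      have hB : pvGroupStep (gs ++ [g]) (n, v) = gs ++ [g ++ [(n, v)]] := by
        unfold pvGroupStep
        rw [if_pos ⟨by simp, hBcond⟩, hlastD, hdrop]
      have hA : pvAStep (clusters, start, end_) v = (clusters, start, v) := by
        simp [pvAStep, hcond]
      rw [hB, hA]
      have hg' : g ++ [(n, v)] ≠ [] := by simp
      have hhead : ((g ++ [(n, v)]).headD (0, 0)) = g.headD (0, 0) := by
        cases g with
        | nil => exact absurd rfl hg
        | cons a t => simp
      exact ih (n + 1) clusters start v gs (g ++ [(n, v)]) hg' h1
        (by rw [hhead, h2]) (by simp)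
        (by rw [hhead, hk]; omega)
    · -- close the current run / open a new group
      have hB : pvGroupStep (gs ++ [g]) (n, v) = (gs ++ [g]) ++ [[(n, v)]] := by
        unfold pvGroupStep
        rw [if_neg]
        intro ⟨_, hkey⟩
        rw [hlastD, hk] at hkey
        omega
      have hA : pvAStep (clusters, start, end_) v = (clusters ++ [(start, end_)], v, v) := by
        simp [pvAStep, hcond]
      rw [hB, hA]
      exact ih (n + 1) (clusters ++ [(start, end_)]) v v (gs ++ [g]) [(n, v)] (by simp)
        (by simp only [List.map_append, List.map_cons, List.map_nil, h1, hpe]) rfl rfl (by simp)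

-- ===== VERDICT (by name: the statement is the Claim_ definition above) =====
theorem find_contiguous_clusters_py_spec : Claim_equal_find_contiguous_clusters_py := by
  intro indices _
  unfold Spec_find_contiguous_clusters_py find_contiguous_clusters_py find_contiguous_clusters_py_alt
  cases indices with
  | nil => simp [pvEnum]
  | cons i0 rest =>
    simp only [pvEnum, List.foldl_cons]
    have hB0 : pvGroupStep [] (0, i0) = [] ++ [[(0, i0)]] := by
      unfold pvGroupStep
      rw [if_neg (by intro h; exact h.1 rfl)]
    rw [hB0]
    exact pv_simul rest 1 [] i0 i0 [] [(0, i0)] (by simp) rfl rfl rfl (by simp)
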